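-- pv_equiv track=rewrite | github.com/rafanthx13/competitive-programming | marathon-codes/Maratonas/U_._R_._I/3. string/string-1243.py | isAWord
-- ===== SOURCE A (Python) =====
-- def copy_string(string):
--   s = ""
--   for i in string:
--     s = s + i
--   return s
--
-- def isAWord(string):
--   splited = copy_string(string).split()
--   listaPalavras = []
--   # verifica para cada palavra ad lista se sao valiads ou nao
--   for indexWord in range(len(splited)):
--     isWordFlag = True
--     aWord = splited[indexWord]
--     # verifica se tem numero, se tiver, sera false
--     for i in range(len(aWord)):
--       c = aWord[i]
--       if( (not c.isalpha() and c != " " and c != ".") or (c == "." and i != (len(aWord) -1)) ):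
--         isWordFlag = False
--         break
--     # checka a word
--     if(isWordFlag):
--       listaPalavras.append(aWord)
--   # Retornara uma lista das palavras validas
--   return listaPalavras
-- ===== SOURCE B (Python) =====
-- def isAWord(string):
--   def is_valid(w):
--     if w.endswith('.'):
--       core = w[:-1]
--       return core == '' or core.isalpha()
--     return w.isalpha()
--   return [w for w in string.split() if is_valid(w)]
-- ===== Notes on version B (the rewrite author's own statement) =====
-- stated objective: simpler
-- what changed: Drops the useless copy_string (quadratic repeated string concatenation) and the nested index loop with manual per-character classification; B validates each word with whole-string built-ins (endswith/slice/isalpha) inside a single filtering comprehension.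
import Mathlib
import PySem

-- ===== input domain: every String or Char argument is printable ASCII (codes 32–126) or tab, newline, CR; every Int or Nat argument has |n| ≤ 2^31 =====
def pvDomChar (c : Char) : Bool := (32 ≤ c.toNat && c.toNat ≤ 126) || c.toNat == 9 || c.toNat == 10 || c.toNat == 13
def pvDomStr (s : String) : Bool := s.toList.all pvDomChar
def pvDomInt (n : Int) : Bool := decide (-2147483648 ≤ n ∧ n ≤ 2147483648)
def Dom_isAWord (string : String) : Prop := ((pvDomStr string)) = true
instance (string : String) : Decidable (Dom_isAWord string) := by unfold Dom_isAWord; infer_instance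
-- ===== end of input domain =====

-- B replaces copy_string and the nested per-character index loop by a single
-- filtering comprehension over whole-string built-ins (endswith / slice / isalpha): simpler.


-- ===== PORT A =====
-- copy_string: builds a fresh copy character by character (ported on code points)
def copyString (string : String) : String :=
  String.ofList (string.toList.foldl (fun s i => s ++ [i]) [])

-- inner loop of A: for i in range(len(aWord)) with break on the first bad character
def checkAGo (cs : List Char) (i : Nat) : Bool :=
  if h : i < cs.length then
    let c := cs[i]
    if ((!PySem.Chars.isalpha c) && !(c == ' ') && !(c == '.')) ||
        ((c == '.') && !(i == cs.length - 1)) then false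
    else checkAGo cs (i + 1)
  else true
termination_by cs.length - i

def isAWord (string : String) : List String :=
  let splited := PySem.Str.split₀ (copyString string)
  (PySem.List.pyRange 0 (PySem.List.len splited)).foldl
    (fun listaPalavras indexWord =>
      let aWord := PySem.List.pyGetD splited indexWord ""
      if checkAGo aWord.toList 0 then listaPalavras ++ [aWord] else listaPalavras) []

-- ===== PORT B =====
def isValidWord (w : String) : Bool :=
  if PySem.Str.endswith w "." then
    let core := PySem.Str.slice w none (some (-1))
    core == "" || PySem.Str.strIsalpha core
  else
    PySem.Str.strIsalpha w

def isAWord_alt (string : String) : List String :=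
  (PySem.Str.split₀ string).filter isValidWord

-- ===== PRECONDITION & SPEC =====
def Spec_isAWord (string : String) (out : List String) : Prop := out = isAWord_alt string
instance (string : String) (out : List String) : Decidable (Spec_isAWord string out) := by unfold Spec_isAWord; infer_instance

-- ===== CLAIM (what is proved, stated in full; the proofs are below) =====
def Claim_equal_isAWord : Prop := ∀ (string : String), Dom_isAWord string → Spec_isAWord string (isAWord string)

-- ===== LEMMAS AND PROOFS =====

-- structural reformulation of A's inner loop
def checkList (cs : List Char) : Bool :=
  match cs with
  | [] => true
  | c :: rest =>
    if ((!PySem.Chars.isalpha c) && !(c == ' ') && !(c == '.')) ||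
        ((c == '.') && !(rest == [])) then false
    else checkList rest

lemma checkAGo_eq_checkList (cs : List Char) (i : Nat) (hi : i ≤ cs.length) :
    checkAGo cs i = checkList (cs.drop i) := by
  have key : ∀ n i, i ≤ cs.length → cs.length - i = n → checkAGo cs i = checkList (cs.drop i) := by
    intro n
    induction n with
    | zero =>
      intro i hi h0
      have hd : cs.drop i = [] := List.drop_eq_nil_iff.mpr (by omega)
      rw [checkAGo]
      simp [show ¬ i < cs.length by omega, hd, checkList]
    | succ n ih =>
      intro i hi hn
      have h : i < cs.length := by omega
      rw [checkAGo]
      simp only [h, dif_pos]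
      have hdrop : cs.drop i = cs[i] :: cs.drop (i + 1) := List.drop_eq_getElem_cons h
      rw [hdrop, checkList]
      have hlast : (i == cs.length - 1) = (cs.drop (i + 1) == []) := by
        rw [Bool.eq_iff_iff]
        simp [List.drop_eq_nil_iff]
        omega
      rw [hlast]
      split
      · rfl
      · exact ih (i + 1) (by omega) (by omega)
  exact key (cs.length - i) i hi rfl

-- words produced by split() are nonempty and contain no whitespace character
lemma split₀go_words (cs cur : List Char) (acc : List (List Char))
    (hcur : ∀ c ∈ cur, PySem.Chars.isspace c = false)
    (hacc : ∀ w ∈ acc, w ≠ [] ∧ ∀ c ∈ w, PySem.Chars.isspace c = false) :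
    ∀ w ∈ PySem.Chars.split₀.go cs cur acc, w ≠ [] ∧ ∀ c ∈ w, PySem.Chars.isspace c = false := by
  induction cs generalizing cur acc with
  | nil =>
    intro w hw
    rw [PySem.Chars.split₀.go] at hw
    split at hw
    · exact hacc _ (by simpa using hw)
    · rename_i hne
      rcases List.mem_cons.mp (List.mem_reverse.mp hw) with h' | h'
      · subst h'
        refine ⟨by simpa [List.isEmpty_iff] using hne, fun c hc => hcur c (List.mem_reverse.mp hc)⟩
      · exact hacc _ h'
  | cons c rest ih =>
    intro w hw
    rw [PySem.Chars.split₀.go] at hw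
    split at hw
    · split at hw
      · exact ih [] acc (by simp) hacc w hw
      · refine ih [] _ (by simp) ?_ w hw
        intro w' hw'
        rcases List.mem_cons.mp hw' with h | h
        · subst h
          rename_i hsp hne
          exact ⟨by simpa [List.isEmpty_iff] using hne, fun c hc => hcur c (List.mem_reverse.mp hc)⟩
        · exact hacc _ h
    · rename_i hsp
      refine ih (c :: cur) acc ?_ hacc w hw
      intro c' hc'
      rcases List.mem_cons.mp hc' with h | h
      · subst h; simpa using hsp
      · exact hcur c' h

lemma split₀_words (s : List Char) :
    ∀ w ∈ PySem.Chars.split₀ s, w ≠ [] ∧ ∀ c ∈ w, PySem.Chars.isspace c = false := by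
  exact split₀go_words s [] [] (by simp) (by simp)

lemma ne_space_of_not_isspace {c : Char} (h : PySem.Chars.isspace c = false) : (c == ' ') = false := by
  by_cases h2 : c = ' '
  · subst h2; simp [PySem.Chars.isspace] at h
  · simp [h2]

-- A's inner loop on a concat-decomposed space-free word
lemma checkList_concat (l : List Char) (a : Char)
    (hsp : ∀ c ∈ l, PySem.Chars.isspace c = false) (ha : PySem.Chars.isspace a = false) :
    checkList (l ++ [a]) = (l.all PySem.Chars.isalpha && (PySem.Chars.isalpha a || a == '.')) := by
  induction l with
  | nil =>
    have h1 : (a == ' ') = false := ne_space_of_not_isspace ha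
    simp only [List.nil_append, checkList, List.all_nil, Bool.true_and, h1]
    by_cases h2 : a = '.'
    · subst h2; simp [PySem.Chars.isalpha, PySem.Chars.isupper, PySem.Chars.islower]
    · by_cases h3 : PySem.Chars.isalpha a = true
      · simp [h3]
      · simp only [Bool.not_eq_true] at h3
        simp [h2, h3]
  | cons c l ih =>
    have hc : (c == ' ') = false := ne_space_of_not_isspace (hsp c List.mem_cons_self)
    have ihl := ih (fun x hx => hsp x (List.mem_cons_of_mem c hx))
    simp only [List.cons_append, checkList, hc, List.all_cons]
    by_cases h2 : c = '.'
    · subst h2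
      simp [PySem.Chars.isalpha, PySem.Chars.isupper, PySem.Chars.islower]
    · by_cases h3 : PySem.Chars.isalpha c = true
      · simpa [h2, h3] using ihl
      · simp only [Bool.not_eq_true] at h3
        simp [h2, h3]

-- B's validity check on a concat-decomposed word
lemma valid_concat (l : List Char) (a : Char) :
    isValidWord (String.ofList (l ++ [a]))
      = (l.all PySem.Chars.isalpha && (PySem.Chars.isalpha a || a == '.')) := by
  unfold isValidWord
  by_cases h2 : a = '.'
  · subst h2
    have he : PySem.Str.endswith (String.ofList (l ++ ['.'])) "." = true := by
      simp [PySem.Str.endswith_eq, PySem.Chars.endswith_iff]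
    rw [if_pos he]
    have hcore : PySem.Str.slice (String.ofList (l ++ ['.'])) none (some (-1))
        = String.ofList l := by
      simp [PySem.Str.slice, PySem.List.slice_to_neg_one]
    rw [hcore]
    show (String.ofList l == "" || PySem.Str.strIsalpha (String.ofList l))
        = (l.all PySem.Chars.isalpha && (PySem.Chars.isalpha '.' || '.' == '.'))
    have : (String.ofList l == "") = (l == []) := by
      rw [Bool.eq_iff_iff]
      constructor
      · intro h
        have : String.ofList l = "" := by simpa using h
        have : l = [] := by
          have := congrArg String.toList this
          simpa using this
        simp [this]
      · intro h
        have : l = [] := by simpa using h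
        subst this; simp
    rw [this]
    cases l with
    | nil => simp [PySem.Str.strIsalpha, PySem.Chars.strIsalpha, PySem.Chars.isalpha,
        PySem.Chars.isupper, PySem.Chars.islower]
    | cons c t =>
      simp [PySem.Str.strIsalpha, PySem.Chars.strIsalpha, PySem.Chars.isalpha,
        PySem.Chars.isupper, PySem.Chars.islower]
  · have hsuf : ¬ (['.'] <:+ l ++ [a]) := by
      intro hs
      rcases hs with ⟨t, ht⟩
      have : a = '.' := by
        have := congrArg List.getLast? ht
        simpa using this.symm
      exact h2 this
    have he : PySem.Chars.endswith (l ++ [a]) ['.'] = false := by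
      rw [Bool.eq_false_iff]
      intro h
      exact hsuf ((PySem.Chars.endswith_iff _ _).mp h)
    rw [if_neg (by simp [he, show ".".toList = ['.'] from rfl])]
    rw [show (a == '.') = false from by simpa using h2]
    simp [PySem.Str.strIsalpha, PySem.Chars.strIsalpha,
      show (l ++ [a]).isEmpty = false by simp]

-- pointwise agreement of the two validity checks on space-free nonempty words
lemma check_eq_valid (cs : List Char) (hne : cs ≠ [])
    (hsp : ∀ c ∈ cs, PySem.Chars.isspace c = false) :
    checkList cs = isValidWord (String.ofList cs) := by
  rcases (List.eq_nil_or_concat cs).resolve_left hne with ⟨l, a, rfl⟩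
  simp only [List.concat_eq_append]
  simp only [List.concat_eq_append] at hsp
  rw [valid_concat, checkList_concat]
  · intro c hc; exact hsp c (by simp [hc])
  · exact hsp a (by simp)

theorem isAWord_spec_aux (string : String) : isAWord string = isAWord_alt string := by
  have hcopy : copyString string = string := by
    unfold copyString
    rw [PySem.List.foldl_append_singleton]
    simp
  unfold isAWord isAWord_alt
  rw [hcopy]
  rw [PySem.List.foldl_pyRange_pyGetD (PySem.Str.split₀ string) ""
      (fun acc w => if checkAGo w.toList 0 then acc ++ [w] else acc) [] (le_refl 0)]
  rw [show (0 : Int).toNat = 0 from rfl, List.drop_zero]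
  have hfi : List.foldl (fun acc w => if checkAGo w.toList 0 then acc ++ [w] else acc) []
      (PySem.Str.split₀ string)
      = List.filter (fun w => checkAGo w.toList 0) (PySem.Str.split₀ string) := by
    simpa using PySem.List.foldl_append_if (fun w => checkAGo w.toList 0) id
      (PySem.Str.split₀ string) []
  rw [hfi]
  apply List.filter_congr
  intro w hw
  rcases List.mem_map.mp (by simpa [PySem.Str.split₀] using hw) with ⟨u, hu, rfl⟩
  rcases split₀_words string.toList u hu with ⟨hne, hsp⟩
  rw [show (String.ofList u).toList = u from String.toList_ofList]
  rw [checkAGo_eq_checkList u 0 (by omega), List.drop_zero]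
  exact check_eq_valid u hne hsp

-- ===== VERDICT (by name: the statement is the Claim_ definition above) =====
theorem isAWord_spec : Claim_equal_isAWord := by
  intro string _
  show _ = _
  exact isAWord_spec_aux string
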